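-- pv_equiv track=rewrite | github.com/tarunarty/Linear-Algebra | Linear Algebra functions.py | free_variables
-- ===== SOURCE A (Python) =====
-- def is_pivot (M,i, flag = 0):
--     #Only returns None if row is empty
--
--     k = len(M[0])
--     if (flag):
--         k = len(M[0]) - 1
--
--     for j in range(k):
--         if (M[i][j]):
--             return j
--
--     return None
--
-- def free_variables (S):
--
--     dim = len(S)
--     free = {}
--     for i in range(dim):
--         free[i] = []
--
--     for i in range(dim):
--
--
--         j = is_pivot(S, i)
--
--         if (j == None):
--             continue
--         else:
--             for k in range(j + 1, dim):
--                 if (S[i][k]):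
--                     free[i] = free[i] + [k]
--
--
--     return free
-- ===== SOURCE B (Python) =====
-- def free_variables(S):
--     dim = len(S)
--     free = {i: [] for i in range(dim)}
--     pivoted = [False] * dim
--     for k in range(dim):
--         for i in range(dim):
--             if S[i][k]:
--                 if pivoted[i]:
--                     free[i].append(k)
--                 else:
--                     pivoted[i] = True
--     return free
-- ===== Notes on version B (the rewrite author's own statement) =====
-- stated objective: alternative
-- what changed: B traverses the matrix column-major: a single nested loop over columns k then rows i, with a per-row pivoted flag array, appending k to free[i] in place only after row i's first nonzero has been seen; A works row-major, first searching each row's pivot with is_pivot and then rescanning the columns after it, rebuilding free[i] with free[i] = free[i] + [k] at every hit.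
-- outside the precondition, e.g. on free_variables([[0, 0], [0, 0], [0, 0]]): A returns {0: [], 1: [], 2: []}, B raises IndexError
import Mathlib
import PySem

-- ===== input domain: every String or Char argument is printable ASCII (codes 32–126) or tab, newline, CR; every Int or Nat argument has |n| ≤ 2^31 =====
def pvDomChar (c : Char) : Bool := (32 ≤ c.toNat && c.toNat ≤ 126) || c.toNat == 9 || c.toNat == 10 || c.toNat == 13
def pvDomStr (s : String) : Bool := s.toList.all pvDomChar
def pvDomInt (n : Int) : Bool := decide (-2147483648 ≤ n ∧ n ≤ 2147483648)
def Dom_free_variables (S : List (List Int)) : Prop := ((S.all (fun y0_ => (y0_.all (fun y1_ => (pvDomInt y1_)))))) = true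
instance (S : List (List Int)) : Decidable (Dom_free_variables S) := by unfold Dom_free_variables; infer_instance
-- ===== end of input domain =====

-- B traverses column-major (columns outer, rows inner) with a per-row pivoted-flag array,
-- instead of A's row-major pivot search plus post-pivot rescan; return value only.


-- ===== PORT A =====
-- row access M[i][j]: pyGet?/pyGetD with defaults; exact wherever Python does not raise (guaranteed by Pre_)
def fv_row (M : List (List Int)) (i : Int) : List Int := (PySem.List.pyGet? M i).getD []

-- 'for j in range(k): if M[i][j]: return j; return None'
def fv_pivotLoop (M : List (List Int)) (i : Int) : List Int → Option Int
  | [] => none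
  | j :: js => if PySem.List.pyGetD (fv_row M i) j 0 ≠ 0 then some j else fv_pivotLoop M i js

def is_pivot (M : List (List Int)) (i : Int) (flag : Int) : Option Int :=
  let k : Int := ((PySem.List.pyGet? M 0).getD []).length
  let k : Int := if flag ≠ 0 then ((PySem.List.pyGet? M 0).getD []).length - 1 else k
  fv_pivotLoop M i (PySem.List.pyRange 0 k 1)

def free_variables (S : List (List Int)) : List (Int × List Int) :=
  let dim : Int := (S.length : Int)
  let free : PySem.Dict Int (List Int) :=
    (PySem.List.pyRange 0 dim 1).foldl (fun d i => d.insert i []) PySem.Dict.empty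
  let free :=
    (PySem.List.pyRange 0 dim 1).foldl (fun d i =>
      match is_pivot S i 0 with
      | none => d
      | some j =>
        (PySem.List.pyRange (j + 1) dim 1).foldl (fun d k =>
          if PySem.List.pyGetD (fv_row S i) k 0 ≠ 0
          then d.insert i (d.getD i [] ++ [k]) else d) d) free
  free.items

-- ===== PORT B =====
-- row access S[i] for B (same PySem primitive, B's own helper)
def fv_row_alt (M : List (List Int)) (i : Int) : List Int := (PySem.List.pyGet? M i).getD []

-- body of B's inner loop over rows i at column k; i comes from range(dim) so 0 ≤ i and
-- pivoted[i] / pivoted[i] = True are exactly getD i.toNat / set i.toNat; free[i].append(k)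
-- rebinds key i in place (insert on an existing key keeps its position)
def fv_colStep (S : List (List Int)) (k : Int)
    (fp : PySem.Dict Int (List Int) × List Bool) (i : Int) :
    PySem.Dict Int (List Int) × List Bool :=
  if PySem.List.pyGetD (fv_row_alt S i) k 0 ≠ 0 then
    if fp.2.getD i.toNat false then
      (fp.1.insert i (fp.1.getD i [] ++ [k]), fp.2)
    else (fp.1, fp.2.set i.toNat true)
  else fp

def free_variables_alt (S : List (List Int)) : List (Int × List Int) :=
  let dim : Int := (S.length : Int)
  let free : PySem.Dict Int (List Int) :=
    (PySem.List.pyRange 0 dim 1).foldl (fun d i => d.insert i []) PySem.Dict.empty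
  let pivoted : List Bool := List.replicate S.length false
  let fp := (PySem.List.pyRange 0 dim 1).foldl
      (fun fp k => (PySem.List.pyRange 0 dim 1).foldl (fv_colStep S k) fp) (free, pivoted)
  fp.1.items

-- ===== PRECONDITION & SPEC =====
-- Pre_ excludes matrices whose first row is narrower than the number of rows, or some row narrower
-- than the first: on most of them A raises IndexError, and on the rest (all reachable entries zero,
-- or the missing columns never inspected) A returns only because its scans stop short of the missing
-- entries, while B's uniform column sweep over range(dim) raises there.
def Pre_free_variables (S : List (List Int)) : Prop :=
  S.length ≤ (S.headD []).length ∧ ∀ row ∈ S, (S.headD []).length ≤ row.length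
instance (S : List (List Int)) : Decidable (Pre_free_variables S) := by
  unfold Pre_free_variables; infer_instance

def pvWitness_free_variables : List (List Int) := [[1, 0], [0, 1]]

def Spec_free_variables (S : List (List Int)) (out : List (Int × List Int)) : Prop :=
  out = free_variables_alt S
instance (S : List (List Int)) (out : List (Int × List Int)) : Decidable (Spec_free_variables S out) := by
  unfold Spec_free_variables; infer_instance

-- ===== CLAIM (what is proved, stated in full; the proofs are below) =====
def Claim_equal_free_variables : Prop :=
  ∀ (S : List (List Int)), Dom_free_variables S → Pre_free_variables S →
    Spec_free_variables S (free_variables S)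

-- ===== LEMMAS AND PROOFS =====

-- the nonzero-entry predicate both ports share (row i, column k)
def nzP (S : List (List Int)) (i : Int) : Int → Bool :=
  fun k => decide (PySem.List.pyGetD (fv_row S i) k 0 ≠ 0)

-- value stored for row i by A's second loop
def vA (S : List (List Int)) (i : Int) : List Int :=
  match is_pivot S i 0 with
  | none => []
  | some j => (PySem.List.pyRange (j + 1) (S.length : Int) 1).filter (nzP S i)

-- value B ends with for row i: all nonzero columns in range(dim) minus the first (the pivot)
def vB (S : List (List Int)) (i : Int) : List Int :=
  ((PySem.List.pyRange 0 (S.length : Int) 1).filter (nzP S i)).tail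

lemma row_alt_eq : fv_row_alt = fv_row := rfl

-- re-inserting a key's current value is a no-op
lemma dict_insert_get_self (d : PySem.Dict Int (List Int)) (i : Int) (w : List Int)
    (hnd : d.keys.Nodup) (h : d.get? i = some w) : d.insert i w = d := by
  apply PySem.Dict.ext
  have hc : d.contains i = true := by
    rw [PySem.Dict.contains_eq_isSome_get?, h]; rfl
  rw [PySem.Dict.items_insert_of_contains _ _ hc]
  conv_rhs => rw [← List.map_id d.items]
  apply List.map_congr_left
  intro p hp
  by_cases he : p.1 = i
  · have hmem : (p.1, p.2) ∈ d.items := by simpa using hp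
    have hpv : d.get? p.1 = some p.2 := PySem.Dict.get?_of_mem_items d hmem hnd
    rw [he, h] at hpv
    have hw : w = p.2 := Option.some.inj hpv
    rw [hw, ← he]; simp
  · simp [he]

-- A's inner collection loop, characterised
lemma innerL (S : List (List Int)) (i : Int) :
    ∀ (ks : List Int) (d : PySem.Dict Int (List Int)), d.keys.Nodup → d.contains i = true →
    ks.foldl (fun d k => if PySem.List.pyGetD (fv_row S i) k 0 ≠ 0
        then d.insert i (d.getD i [] ++ [k]) else d) d
      = d.insert i (d.getD i [] ++ ks.filter (nzP S i)) := by
  intro ks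
  induction ks with
  | nil =>
    intro d hnd hc
    simp only [List.foldl_nil, List.filter_nil, List.append_nil]
    have hs : (d.get? i).isSome := by rw [← PySem.Dict.contains_eq_isSome_get?]; exact hc
    obtain ⟨w, hw⟩ := Option.isSome_iff_exists.mp hs
    rw [PySem.Dict.getD_eq_get?_getD, hw]
    exact (dict_insert_get_self d i w hnd hw).symm
  | cons k ks ih =>
    intro d hnd hc
    by_cases hk : PySem.List.pyGetD (fv_row S i) k 0 ≠ 0
    · rw [List.foldl_cons, if_pos hk,
        ih _ (PySem.Dict.nodup_keys_insert _ _ _ hnd) (PySem.Dict.contains_insert_self _ _ _),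
        PySem.Dict.getD_insert_self, PySem.Dict.insert_insert_self]
      simp [nzP, hk]
    · rw [List.foldl_cons, if_neg hk, ih _ hnd hc]
      simp [nzP, hk]

-- A's outer step stores vA
lemma stepA (S : List (List Int)) (i : Int) (d : PySem.Dict Int (List Int))
    (hnd : d.keys.Nodup) (h : d.get? i = some []) :
    (match is_pivot S i 0 with
     | none => d
     | some j =>
       (PySem.List.pyRange (j + 1) (S.length : Int) 1).foldl (fun d k =>
         if PySem.List.pyGetD (fv_row S i) k 0 ≠ 0
         then d.insert i (d.getD i [] ++ [k]) else d) d)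
      = d.insert i (vA S i) := by
  have hc : d.contains i = true := by rw [PySem.Dict.contains_eq_isSome_get?, h]; rfl
  have hd : d.getD i [] = [] := by rw [PySem.Dict.getD_eq_get?_getD, h]; rfl
  unfold vA
  cases hp : is_pivot S i 0 with
  | none => exact (dict_insert_get_self d i [] hnd h).symm
  | some j => dsimp only; rw [innerL S i _ d hnd hc, hd]; rfl

-- generic outer loop (A side): distinct keys initialised to [] get rewritten to v
lemma outerGen (v : Int → List Int) (f : PySem.Dict Int (List Int) → Int → PySem.Dict Int (List Int))
    (hf : ∀ d i, d.keys.Nodup → d.get? i = some [] → f d i = d.insert i (v i)) :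
    ∀ (ts : List Int) (pre : List (Int × List Int)) (d : PySem.Dict Int (List Int)),
      d.keys.Nodup → d.items = pre ++ ts.map (fun i => (i, ([] : List Int))) →
      (ts.foldl f d).items = pre ++ ts.map (fun i => (i, v i)) := by
  intro ts
  induction ts with
  | nil => intro pre d _ hit; simpa using hit
  | cons t ts ih =>
    intro pre d hnd hit
    have hkeys : d.keys = pre.map Prod.fst ++ t :: ts := by
      show d.items.map Prod.fst = _
      rw [hit]; simp [List.map_map, Function.comp_def]
    have hmem : (t, ([] : List Int)) ∈ d.items := by rw [hit]; simp
    have hg : d.get? t = some [] := PySem.Dict.get?_of_mem_items d hmem hnd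
    have hc : d.contains t = true := by rw [PySem.Dict.contains_eq_isSome_get?, hg]; rfl
    have hstep : f d t = d.insert t (v t) := hf d t hnd hg
    have hpre : ∀ p ∈ pre, p.1 ≠ t := by
      intro p hp he
      have hh := hnd
      rw [hkeys] at hh
      have h1 := (List.nodup_append.mp hh).2.2
      exact h1 _ (List.mem_map_of_mem hp) t (List.mem_cons_self) he
    have htsn : t ∉ ts := by
      have := hnd; rw [hkeys] at this
      have h2 := (List.nodup_append.mp this).2.1
      exact (List.nodup_cons.mp h2).1
    have hitems : (f d t).items = (pre ++ [(t, v t)]) ++ ts.map (fun i => (i, ([] : List Int))) := by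
      rw [hstep, PySem.Dict.items_insert_of_contains _ _ hc, hit]
      simp only [List.map_append, List.map_cons, List.append_assoc]
      congr 1
      · conv_rhs => rw [← List.map_id pre]
        apply List.map_congr_left
        intro p hp
        simp [show ¬ (p.1 = t) from hpre p hp]
      · simp only [List.cons_append, List.nil_append]
        congr 1
        · simp
        · rw [List.map_map]
          apply List.map_congr_left
          intro x hx
          simp [show ¬ (x = t) from fun he => htsn (he ▸ hx)]
    have hnd' : (f d t).keys.Nodup := by
      rw [hstep]; exact PySem.Dict.nodup_keys_insert _ _ _ hnd
    rw [List.foldl_cons, ih (pre ++ [(t, v t)]) (f d t) hnd' hitems]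
    simp

-- the pivot-scan + post-pivot collection equals "drop the first collected nonzero column"
lemma pivot_tail (S : List (List Int)) (i n : Int) (hdn : (S.length : Int) ≤ n) :
    ∀ (m : Nat) (a : Int), (n - a).toNat = m →
    (match fv_pivotLoop S i (PySem.List.pyRange a n 1) with
     | none => ([] : List Int)
     | some j => (PySem.List.pyRange (j + 1) (S.length : Int) 1).filter (nzP S i))
      = ((PySem.List.pyRange a (S.length : Int) 1).filter (nzP S i)).tail := by
  intro m
  induction m with
  | zero =>
    intro a ha
    have hna : n ≤ a := by omega
    rw [PySem.List.pyRange_one_eq_nil hna, PySem.List.pyRange_one_eq_nil (le_trans hdn hna)]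
    rfl
  | succ m ih =>
    intro a ha
    have han : a < n := by omega
    rw [PySem.List.pyRange_one_cons han]
    simp only [fv_pivotLoop]
    by_cases hz : PySem.List.pyGetD (fv_row S i) a 0 ≠ 0
    · rw [if_pos hz]
      dsimp only
      by_cases hadim : a < (S.length : Int)
      · rw [PySem.List.pyRange_one_cons hadim]
        simp [nzP, hz]
      · rw [PySem.List.pyRange_one_eq_nil (show (S.length : Int) ≤ a by omega),
          PySem.List.pyRange_one_eq_nil (show (S.length : Int) ≤ a + 1 by omega)]
        rfl
    · rw [if_neg hz]
      rw [ih (a + 1) (by omega)]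
      by_cases hadim : a < (S.length : Int)
      · rw [PySem.List.pyRange_one_cons hadim]
        simp [nzP, hz]
      · rw [PySem.List.pyRange_one_eq_nil (show (S.length : Int) ≤ a + 1 by omega),
          PySem.List.pyRange_one_eq_nil (show (S.length : Int) ≤ a by omega)]

lemma vA_eq_vB (S : List (List Int)) (hpre : Pre_free_variables S) (i : Int) :
    vA S i = vB S i := by
  have hn : ((PySem.List.pyGet? S 0).getD []).length = (S.headD []).length := by
    cases S
    · simp [PySem.List.pyGet?]
    · rw [PySem.List.pyGet?_zero_cons]; rfl
  have hdn : (S.length : Int) ≤ (((PySem.List.pyGet? S 0).getD []).length : Int) := by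
    rw [hn]; exact_mod_cast hpre.1
  unfold vA vB is_pivot
  simpa using pivot_tail S i (((PySem.List.pyGet? S 0).getD []).length : Int) hdn _ 0 rfl

-- ===== B-side lemmas =====

-- List.set on a map over range rewrites the function at one point
lemma set_map_range {β : Type} (g : Nat → β) (m n : Nat) (b : β) :
    ((List.range m).map g).set n b
      = (List.range m).map (fun j => if j = n then b else g j) := by
  apply List.ext_getElem
  · simp
  · intro i h1 h2
    simp only [List.getElem_set, List.getElem_map, List.getElem_range]
    rcases eq_or_ne n i with hi | hi
    · simp [hi]
    · rw [if_neg hi, if_neg (Ne.symm hi)]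

-- B's inner loop over rows at column k: every row's slot gets one step applied
lemma innerB (S : List (List Int)) (k : Int) (F : Int → List Int) (P : Int → Bool) :
    ∀ (m : Nat) (a : Int), 0 ≤ a → ((S.length : Int) - a).toNat = m →
    ∀ (f : PySem.Dict Int (List Int)) (p : List Bool),
      f.keys.Nodup →
      f.items = (PySem.List.pyRange 0 (S.length : Int) 1).map
        (fun i => (i, if i < a then (if nzP S i k && P i then F i ++ [k] else F i) else F i)) →
      p = (List.range S.length).map
        (fun n : Nat => if (n : Int) < a then (P (n : Int) || nzP S (n : Int) k) else P (n : Int)) →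
      ((PySem.List.pyRange a (S.length : Int) 1).foldl (fv_colStep S k) (f, p)).1.items
          = (PySem.List.pyRange 0 (S.length : Int) 1).map
              (fun i => (i, if nzP S i k && P i then F i ++ [k] else F i))
        ∧ ((PySem.List.pyRange a (S.length : Int) 1).foldl (fv_colStep S k) (f, p)).2
          = (List.range S.length).map (fun n : Nat => (P (n : Int) || nzP S (n : Int) k)) := by
  intro m
  induction m with
  | zero =>
    intro a ha0 ham f p hnd hf hp
    have hna : (S.length : Int) ≤ a := by omega
    rw [PySem.List.pyRange_one_eq_nil hna, List.foldl_nil]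
    constructor
    · rw [hf]
      apply List.map_congr_left
      intro i hi
      have : i < a := lt_of_lt_of_le (PySem.List.mem_pyRange_one.mp hi).2 hna
      simp [this]
    · rw [hp]
      apply List.map_congr_left
      intro n hn
      have : (n : Int) < a := lt_of_lt_of_le
        (by exact_mod_cast List.mem_range.mp hn) hna
      simp [this]
  | succ m ih =>
    intro a ha0 ham f p hnd hf hp
    have haS : a < (S.length : Int) := by omega
    have haN : a.toNat < S.length := by omega
    have haI : ((a.toNat : Nat) : Int) = a := Int.toNat_of_nonneg ha0
    have haR : a ∈ PySem.List.pyRange 0 (S.length : Int) 1 :=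
      PySem.List.mem_pyRange_one.mpr ⟨ha0, haS⟩
    -- current pivoted flag at row a is P a
    have hgetp : p.getD a.toNat false = P a := by
      rw [hp, PySem.List.getD_map_range _ _ _ _ haN, haI]
      simp
    -- current dict value at key a is F a
    have hmem : (a, F a) ∈ f.items := by
      rw [hf]
      refine List.mem_map.mpr ⟨a, haR, ?_⟩
      simp
    have hget : f.get? a = some (F a) := PySem.Dict.get?_of_mem_items f hmem hnd
    have hc : f.contains a = true := by rw [PySem.Dict.contains_eq_isSome_get?, hget]; rfl
    have hgetD : f.getD a [] = F a := by rw [PySem.Dict.getD_eq_get?_getD, hget]; rfl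
    have hgetp' : p[a.toNat]?.getD false = P a := hgetp
    rw [PySem.List.pyRange_one_cons haS, List.foldl_cons]
    -- the step at row a
    by_cases hz : PySem.List.pyGetD (fv_row S a) k 0 ≠ 0
    · by_cases hP : P a = true
      · -- nonzero entry, pivot already seen: append k to free[a]
        have hstep : fv_colStep S k (f, p) a
            = (f.insert a (F a ++ [k]), p) := by
          simp [fv_colStep, row_alt_eq, hz, hgetp', hP, hgetD]
        rw [hstep]
        refine ih (a + 1) (by omega) (by omega) _ _
          (PySem.Dict.nodup_keys_insert _ _ _ hnd) ?_ ?_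
        · rw [PySem.Dict.items_insert_of_contains _ _ hc, hf, List.map_map]
          apply List.map_congr_left
          intro i hi
          by_cases hia : i = a
          · rw [hia]
            simp [Function.comp, hP, show (a : Int) < a + 1 by omega,
              show nzP S a k = true by simp [nzP, hz]]
          · have h1 : (i < a + 1) ↔ (i < a) := by omega
            simp [Function.comp, hia, h1]
        · rw [hp]
          apply List.map_congr_left
          intro n hn
          by_cases hna : (n : Int) = a
          · simp [hna, hP, show (a : Int) < a + 1 by omega]
          · have h1 : ((n : Int) < a + 1) ↔ ((n : Int) < a) := by omega
            simp [h1]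
      · -- nonzero entry, first one in the row: set the pivoted flag
        have hP' : P a = false := by simpa using hP
        have hstep : fv_colStep S k (f, p) a = (f, p.set a.toNat true) := by
          simp [fv_colStep, row_alt_eq, hz, hgetp', hP']
        rw [hstep]
        refine ih (a + 1) (by omega) (by omega) _ _ hnd ?_ ?_
        · rw [hf]
          apply List.map_congr_left
          intro i hi
          by_cases hia : i = a
          · rw [hia]
            simp [hP', show (a : Int) < a + 1 by omega]
          · have h1 : (i < a + 1) ↔ (i < a) := by omega
            simp [h1]
        · rw [hp, set_map_range]
          apply List.map_congr_left
          intro n hn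
          by_cases hna : n = a.toNat
          · rw [hna]
            simp [haI, hP', show (a : Int) < a + 1 by omega,
              show nzP S a k = true by simp [nzP, hz]]
          · have hne : ((n : Int) ≠ a) := by omega
            have h1 : ((n : Int) < a + 1) ↔ ((n : Int) < a) := by omega
            simp [hna, h1]
    · -- zero entry: state unchanged
      have hstep : fv_colStep S k (f, p) a = (f, p) := by
        simp [fv_colStep, row_alt_eq, hz]
      rw [hstep]
      refine ih (a + 1) (by omega) (by omega) _ _ hnd ?_ ?_
      · rw [hf]
        apply List.map_congr_left
        intro i hi
        by_cases hia : i = a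
        · rw [hia]
          simp [show (a : Int) < a + 1 by omega,
            show nzP S a k = false by simp [nzP]; omega]
        · have h1 : (i < a + 1) ↔ (i < a) := by omega
          simp [h1]
      · rw [hp]
        apply List.map_congr_left
        intro n hn
        by_cases hna : (n : Int) = a
        · simp [hna, show (a : Int) < a + 1 by omega,
            show nzP S a k = false by simp [nzP]; omega]
        · have h1 : ((n : Int) < a + 1) ↔ ((n : Int) < a) := by omega
          simp [h1]

-- a dict whose items are a map over the range with fst = id has nodup keys
lemma nodup_keys_of_range_items (d : Int) (f : PySem.Dict Int (List Int)) (g : Int → List Int)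
    (h : f.items = (PySem.List.pyRange 0 d 1).map (fun i => (i, g i))) :
    f.keys.Nodup := by
  show (f.items.map Prod.fst).Nodup
  rw [h, List.map_map]
  simp only [Function.comp_def]
  simpa using PySem.List.nodup_pyRange_one 0 d

-- B's outer loop over columns, with processed columns pyRange 0 a
lemma outerB (S : List (List Int)) :
    ∀ (m : Nat) (a : Int), 0 ≤ a → a ≤ (S.length : Int) → ((S.length : Int) - a).toNat = m →
    ∀ (f : PySem.Dict Int (List Int)) (p : List Bool),
      f.keys.Nodup →
      f.items = (PySem.List.pyRange 0 (S.length : Int) 1).map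
        (fun i => (i, ((PySem.List.pyRange 0 a 1).filter (nzP S i)).tail)) →
      p = (List.range S.length).map
        (fun n : Nat => !((PySem.List.pyRange 0 a 1).filter (nzP S (n : Int))).isEmpty) →
      ((PySem.List.pyRange a (S.length : Int) 1).foldl
          (fun fp k => (PySem.List.pyRange 0 (S.length : Int) 1).foldl (fv_colStep S k) fp)
          (f, p)).1.items
        = (PySem.List.pyRange 0 (S.length : Int) 1).map (fun i => (i, vB S i)) := by
  intro m
  induction m with
  | zero =>
    intro a ha0 haS ham f p hnd hf hp
    have ha : a = (S.length : Int) := by omega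
    rw [ha] at hf ⊢
    rw [PySem.List.pyRange_one_eq_nil (le_refl _), List.foldl_nil, hf]
    rfl
  | succ m ih =>
    intro a ha0 haS2 ham f p hnd hf hp
    have haS : a < (S.length : Int) := by omega
    rw [PySem.List.pyRange_one_cons haS, List.foldl_cons]
    have hfilter : ∀ i : Int, (PySem.List.pyRange 0 (a + 1) 1).filter (nzP S i)
        = (PySem.List.pyRange 0 a 1).filter (nzP S i)
          ++ (if nzP S i a then [a] else []) := by
      intro i
      rw [PySem.List.pyRange_one_append 0 a (a + 1) ha0 (by omega), List.filter_append]
      congr 1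
      rw [PySem.List.pyRange_one_cons (show a < a + 1 by omega),
          PySem.List.pyRange_one_eq_nil (le_refl (a + 1))]
      simp [List.filter_cons]
    have hf0 : f.items = (PySem.List.pyRange 0 (S.length : Int) 1).map
        (fun i => (i, if i < 0
          then (if nzP S i a && !((PySem.List.pyRange 0 a 1).filter (nzP S i)).isEmpty
                then ((PySem.List.pyRange 0 a 1).filter (nzP S i)).tail ++ [a]
                else ((PySem.List.pyRange 0 a 1).filter (nzP S i)).tail)
          else ((PySem.List.pyRange 0 a 1).filter (nzP S i)).tail)) := by
      rw [hf]
      apply List.map_congr_left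
      intro i hi
      have : ¬ (i < 0) := by
        have := (PySem.List.mem_pyRange_one.mp hi).1; omega
      simp [this]
    have hp0 : p = (List.range S.length).map
        (fun n : Nat => if (n : Int) < 0
          then (!((PySem.List.pyRange 0 a 1).filter (nzP S (n : Int))).isEmpty
                || nzP S (n : Int) a)
          else !((PySem.List.pyRange 0 a 1).filter (nzP S (n : Int))).isEmpty) := by
      rw [hp]
      apply List.map_congr_left
      intro n hn
      simp
    obtain ⟨h1, h2⟩ := innerB S a
      (fun i => ((PySem.List.pyRange 0 a 1).filter (nzP S i)).tail)
      (fun i => !((PySem.List.pyRange 0 a 1).filter (nzP S i)).isEmpty)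
      S.length 0 (by omega) (by omega) f p hnd hf0 hp0
    refine ih (a + 1) (by omega) (by omega) (by omega) _ _
      (nodup_keys_of_range_items (S.length : Int) _ _ h1) ?_ ?_
    · rw [h1]
      apply List.map_congr_left
      intro i hi
      have : ((PySem.List.pyRange 0 (a + 1) 1).filter (nzP S i)).tail
          = (if nzP S i a && !((PySem.List.pyRange 0 a 1).filter (nzP S i)).isEmpty
             then ((PySem.List.pyRange 0 a 1).filter (nzP S i)).tail ++ [a]
             else ((PySem.List.pyRange 0 a 1).filter (nzP S i)).tail) := by
        rw [hfilter i]
        cases hnz : nzP S i a with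
        | false => simp
        | true =>
          cases hl : (PySem.List.pyRange 0 a 1).filter (nzP S i) with
          | nil => simp
          | cons x xs => simp
      rw [this]
    · rw [h2]
      apply List.map_congr_left
      intro n hn
      rw [hfilter (n : Int)]
      cases hnz : nzP S (n : Int) a <;> simp

-- ===== VERDICT (by name: the statement is the Claim_ definition above) =====
theorem free_variables_spec : Claim_equal_free_variables := by
  intro S _ hpre
  unfold Spec_free_variables free_variables free_variables_alt
  dsimp only
  have hfresh := PySem.Dict.items_foldl_insert_fresh
    (PySem.List.pyRange 0 (S.length : Int) 1) (fun i => i) (fun _ => ([] : List Int))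
    PySem.Dict.empty (fun a _ => PySem.Dict.contains_empty a)
    (by simpa using PySem.List.nodup_pyRange_one 0 (S.length : Int))
  simp only [show PySem.Dict.empty.items = ([] : List (Int × List Int)) from rfl,
    List.nil_append] at hfresh
  have hknd : (((PySem.List.pyRange 0 (S.length : Int) 1).foldl
      (fun (d : PySem.Dict Int (List Int)) i => d.insert i []) PySem.Dict.empty).keys).Nodup := by
    simp only [PySem.Dict.keys, hfresh, List.map_map, Function.comp_def]
    simpa using PySem.List.nodup_pyRange_one 0 (S.length : Int)
  -- A's loop rewrites every slot to vA
  rw [outerGen (vA S) _ (fun d i hnd hg => stepA S i d hnd hg)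
      (PySem.List.pyRange 0 (S.length : Int) 1) [] _ hknd (by simpa using hfresh)]
  -- B's column sweep rewrites every slot to vB
  rw [outerB S S.length 0 (by omega) (by omega) (by omega) _ _ hknd ?_ ?_]
  · simp only [List.nil_append]
    apply List.map_congr_left
    intro i _
    rw [vA_eq_vB S hpre i]
  · rw [hfresh]
    apply List.map_congr_left
    intro i hi
    rw [PySem.List.pyRange_one_eq_nil (le_refl 0)]
    simp
  · rw [show (PySem.List.pyRange 0 0 1) = ([] : List Int)
        from PySem.List.pyRange_one_eq_nil (le_refl 0)]
    simp
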